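-- pv_equiv track=rewrite | github.com/lipingtababa/liangxiao | agents/developer/agent.py | _format_existing_files
-- ===== SOURCE A (Python) =====
-- from typing import Dict, Any, List, Optional, Tuple, Union
--
-- def _format_existing_files(existing_files: List[str]) -> str:
--     """Format existing files list for prompt.
--
--     Args:
--         existing_files: List of existing file paths
--
--     Returns:
--         Formatted files string
--     """
--     if not existing_files:
--         return "No existing files information available"
--
--     # Organize by type
--     code_files = []
--     config_files = []
--     doc_files = []
--     test_files = []
--
--     for file_path in existing_files[:20]:  # Limit to first 20
--         filename = file_path.split('/')[-1].lower()
--         if any(ext in filename for ext in ['.py', '.js', '.ts', '.java', '.go', '.rs']):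
--             code_files.append(file_path)
--         elif any(ext in filename for ext in ['.json', '.yml', '.yaml', '.toml', '.ini']):
--             config_files.append(file_path)
--         elif any(ext in filename for ext in ['.md', '.txt', '.rst']):
--             doc_files.append(file_path)
--         elif 'test' in filename:
--             test_files.append(file_path)
--
--     parts = []
--     if code_files:
--         parts.append(f"Code files: {', '.join(code_files[:5])}")
--     if config_files:
--         parts.append(f"Config files: {', '.join(config_files[:3])}")
--     if doc_files:
--         parts.append(f"Documentation: {', '.join(doc_files[:3])}")
--     if test_files:
--         parts.append(f"Tests: {', '.join(test_files[:3])}")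
--
--     return "\n".join(parts) if parts else "File structure analysis not available"
-- ===== SOURCE B (Python) =====
-- CATS = [
--     ("Code files", 5, ('.py', '.js', '.ts', '.java', '.go', '.rs')),
--     ("Config files", 3, ('.json', '.yml', '.yaml', '.toml', '.ini')),
--     ("Documentation", 3, ('.md', '.txt', '.rst')),
--     ("Tests", 3, ('test',)),
-- ]
--
--
-- def _basename_lower(path):
--     return path.split('/')[-1].lower()
--
--
-- def _category(path):
--     """Category of a path: the minimum index of any category whose token
--     occurs in the lowercased basename (min encodes the priority), else None."""
--     name = _basename_lower(path)
--     return min((i for i, (_, _, toks) in enumerate(CATS)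
--                 if any(t in name for t in toks)), default=None)
--
--
-- def _format_existing_files(existing_files):
--     """Staged re-implementation: tag each of the first 20 paths with its
--     category index, then build each output line by filtering the tagged list."""
--     if not existing_files:
--         return "No existing files information available"
--     tagged = [(_category(p), p) for p in existing_files[:20]]
--     parts = []
--     for i, (label, limit, _) in enumerate(CATS):
--         chosen = [p for c, p in tagged if c == i][:limit]
--         if chosen:
--             parts.append(label + ": " + ", ".join(chosen))
--     return "\n".join(parts) if parts else "File structure analysis not available"
-- ===== Notes on version B (the rewrite author's own statement) =====
-- stated objective: alternative
-- what changed: Replaces A's single pass that mutates four accumulator lists through an elif chain by a staged pipeline: each path is first tagged with a category index computed as the MINIMUM matching-category index (min encodes the elif priority), and each output line is then built by a separate filter over the tagged list.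
import Mathlib
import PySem

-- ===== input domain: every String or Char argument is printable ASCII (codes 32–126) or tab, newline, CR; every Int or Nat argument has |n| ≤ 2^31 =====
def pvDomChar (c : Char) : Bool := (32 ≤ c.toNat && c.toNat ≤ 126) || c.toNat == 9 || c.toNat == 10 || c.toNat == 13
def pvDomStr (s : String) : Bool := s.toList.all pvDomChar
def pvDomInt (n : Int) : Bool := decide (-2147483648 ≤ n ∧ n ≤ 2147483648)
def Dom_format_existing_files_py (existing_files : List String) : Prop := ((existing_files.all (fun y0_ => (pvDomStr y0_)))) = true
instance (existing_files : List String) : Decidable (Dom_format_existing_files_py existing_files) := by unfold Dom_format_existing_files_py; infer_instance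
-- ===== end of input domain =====

-- B replaces A's single pass over four mutating accumulator lists and an elif chain
-- by a staged pipeline: each path is tagged with a category index computed as the
-- MINIMUM matching-category index, and each output line is then built by a separate
-- filter over the tagged list (objective: alternative, same cost).

-- ===== PORT A =====
-- filename = file_path.split('/')[-1].lower(); split('/') is never empty, so the
-- [-1] index never raises (the .getD "" default is unreachable).
def pvAStep (st : List String × List String × List String × List String)
    (file_path : String) : List String × List String × List String × List String :=
  let filename := PySem.Str.lower
    ((PySem.List.pyGet? (((PySem.Str.split? file_path "/").getD [])) (-1)).getD "")
  if [".py", ".js", ".ts", ".java", ".go", ".rs"].any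
      (fun ext => PySem.Str.isIn ext filename) then
    (st.1 ++ [file_path], st.2.1, st.2.2.1, st.2.2.2)
  else if [".json", ".yml", ".yaml", ".toml", ".ini"].any
      (fun ext => PySem.Str.isIn ext filename) then
    (st.1, st.2.1 ++ [file_path], st.2.2.1, st.2.2.2)
  else if [".md", ".txt", ".rst"].any
      (fun ext => PySem.Str.isIn ext filename) then
    (st.1, st.2.1, st.2.2.1 ++ [file_path], st.2.2.2)
  else if PySem.Str.isIn "test" filename then
    (st.1, st.2.1, st.2.2.1, st.2.2.2 ++ [file_path])
  else st

def format_existing_files_py (existing_files : List String) : String :=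
  if existing_files = [] then "No existing files information available"
  else
    let st := (PySem.List.slice existing_files none (some 20)).foldl pvAStep ([], [], [], [])
    let parts : List String := []
    let parts := if st.1 ≠ [] then
      parts ++ ["Code files: " ++ PySem.Str.join ", " (PySem.List.slice st.1 none (some 5))]
      else parts
    let parts := if st.2.1 ≠ [] then
      parts ++ ["Config files: " ++ PySem.Str.join ", " (PySem.List.slice st.2.1 none (some 3))]
      else parts
    let parts := if st.2.2.1 ≠ [] then
      parts ++ ["Documentation: " ++ PySem.Str.join ", " (PySem.List.slice st.2.2.1 none (some 3))]
      else parts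
    let parts := if st.2.2.2 ≠ [] then
      parts ++ ["Tests: " ++ PySem.Str.join ", " (PySem.List.slice st.2.2.2 none (some 3))]
      else parts
    if parts = [] then "File structure analysis not available"
    else PySem.Str.join "\n" parts

-- ===== PORT B =====
-- CATS table of Source B: (label, limit, tokens)
def pvCats : List (String × Int × List String) :=
  [("Code files", 5, [".py", ".js", ".ts", ".java", ".go", ".rs"]),
   ("Config files", 3, [".json", ".yml", ".yaml", ".toml", ".ini"]),
   ("Documentation", 3, [".md", ".txt", ".rst"]),
   ("Tests", 3, ["test"])]

-- _basename_lower(path) = path.split('/')[-1].lower()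
def pvName (path : String) : String :=
  PySem.Str.lower
    ((PySem.List.pyGet? (((PySem.Str.split? path "/").getD [])) (-1)).getD "")

-- _category: min((i for i, (_, _, toks) in enumerate(CATS)
--                 if any(t in name for t in toks)), default=None)
def pvCategory (path : String) : Option Int :=
  PySem.List.min?
    ((PySem.List.enumerate pvCats).filterMap (fun ic =>
      if ic.2.2.2.any (fun t => PySem.Str.isIn t (pvName path)) then some ic.1 else none))
    (fun i => i)

def format_existing_files_py_alt (existing_files : List String) : String :=
  if existing_files = [] then "No existing files information available"
  else
    let tagged := (PySem.List.slice existing_files none (some 20)).map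
      (fun p => (pvCategory p, p))
    let parts := (PySem.List.enumerate pvCats).filterMap (fun ic =>
      let chosen := PySem.List.slice
        ((tagged.filter (fun cp => cp.1 == some ic.1)).map Prod.snd)
        none (some ic.2.2.1)
      if chosen ≠ [] then
        some (ic.2.1 ++ ": " ++ PySem.Str.join ", " chosen)
      else none)
    if parts = [] then "File structure analysis not available"
    else PySem.Str.join "\n" parts

-- ===== PRECONDITION & SPEC =====
def Spec_format_existing_files_py (existing_files : List String) (out : String) : Prop := out = format_existing_files_py_alt existing_files
instance (existing_files : List String) (out : String) : Decidable (Spec_format_existing_files_py existing_files out) := by unfold Spec_format_existing_files_py; infer_instance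

-- ===== CLAIM (what is proved, stated in full; the proofs are below) =====
def Claim_equal_format_existing_files_py : Prop := ∀ (existing_files : List String), Dom_format_existing_files_py existing_files → Spec_format_existing_files_py existing_files (format_existing_files_py existing_files)

-- ===== LEMMAS AND PROOFS =====

-- the min-of-matching-indices category, written as A's elif chain over the same tests
lemma pvCategory_eq (p : String) :
    pvCategory p =
      (if [".py", ".js", ".ts", ".java", ".go", ".rs"].any
          (fun ext => PySem.Str.isIn ext (pvName p)) then some 0
      else if [".json", ".yml", ".yaml", ".toml", ".ini"].any
          (fun ext => PySem.Str.isIn ext (pvName p)) then some 1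
      else if [".md", ".txt", ".rst"].any
          (fun ext => PySem.Str.isIn ext (pvName p)) then some 2
      else if ["test"].any (fun ext => PySem.Str.isIn ext (pvName p)) then some 3
      else none) := by
  unfold pvCategory
  simp only [pvCats, PySem.List.enumerate_cons, PySem.List.enumerate_nil,
    List.filterMap_cons, List.filterMap_nil]
  split_ifs <;> decide

lemma pvAStep_eq (st : List String × List String × List String × List String)
    (p : String) :
    pvAStep st p =
      (st.1 ++ (if pvCategory p == some 0 then [p] else []),
       st.2.1 ++ (if pvCategory p == some 1 then [p] else []),
       st.2.2.1 ++ (if pvCategory p == some 2 then [p] else []),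
       st.2.2.2 ++ (if pvCategory p == some 3 then [p] else [])) := by
  have hn : PySem.Str.lower
      ((PySem.List.pyGet? (((PySem.Str.split? p "/").getD [])) (-1)).getD "")
      = pvName p := rfl
  have hc := pvCategory_eq p
  simp only [pvAStep, hn, hc, List.any_cons, List.any_nil, Bool.or_false]
  clear hc hn
  split_ifs <;> simp_all

def pvSel (i : Int) (fs : List String) : List String :=
  fs.filter (fun p => pvCategory p == some i)

lemma pvSel_cons (i : Int) (p : String) (fs : List String) :
    pvSel i (p :: fs)
      = (if pvCategory p == some i then [p] else []) ++ pvSel i fs := by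
  simp only [pvSel, List.filter_cons]
  split <;> simp

lemma pvFold_char (fs : List String)
    (st : List String × List String × List String × List String) :
    fs.foldl pvAStep st
      = (st.1 ++ pvSel 0 fs, st.2.1 ++ pvSel 1 fs,
         st.2.2.1 ++ pvSel 2 fs, st.2.2.2 ++ pvSel 3 fs) := by
  induction fs generalizing st with
  | nil => simp [pvSel]
  | cons p rest ih =>
    rw [List.foldl_cons, ih, pvAStep_eq]
    simp only [pvSel_cons, List.append_assoc]

lemma pvMapFilter {A B : Type} (f : A -> B) (pr : B -> Bool) (fs : List A) :
    ((fs.map (fun p => (f p, p))).filter (fun cp => pr cp.1)).map Prod.snd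
      = fs.filter (fun p => pr (f p)) := by
  induction fs with
  | nil => rfl
  | cons p rest ih =>
    simp only [List.map_cons, List.filter_cons]
    cases hb : pr (f p) <;> simp [ih]

lemma pvTagged_filter (fs : List String) (i : Int) :
    ((fs.map (fun p => (pvCategory p, p))).filter
        (fun cp => cp.1 == some i)).map Prod.snd
      = pvSel i fs := by
  exact pvMapFilter pvCategory (fun c => c == some i) fs

-- ===== VERDICT (by name: the statement is the Claim_ definition above) =====
set_option maxHeartbeats 1000000 in
theorem format_existing_files_py_spec : Claim_equal_format_existing_files_py := by
  intro xs _
  unfold Spec_format_existing_files_py format_existing_files_py format_existing_files_py_alt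
  by_cases h : xs = []
  · simp [h]
  · simp only [h, if_false]
    rw [pvFold_char]
    simp only [pvCats, PySem.List.enumerate_cons, PySem.List.enumerate_nil,
      List.filterMap_cons, List.filterMap_nil, pvTagged_filter, List.nil_append]
    simp only [show ((0:Int)+1) = 1 from rfl, show ((1:Int)+1) = 2 from rfl,
      show ((2:Int)+1) = 3 from rfl]
    simp only [show ((5:Int)) = ((5:Nat):Int) from rfl,
      show ((3:Int)) = ((3:Nat):Int) from rfl, PySem.List.slice_to_natCast]
    generalize pvSel 0 (PySem.List.slice xs none (some 20)) = A0
    generalize pvSel 1 (PySem.List.slice xs none (some 20)) = A1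
    generalize pvSel 2 (PySem.List.slice xs none (some 20)) = A2
    generalize pvSel 3 (PySem.List.slice xs none (some 20)) = A3
    simp only [ne_eq, List.take_eq_nil_iff, OfNat.ofNat_ne_zero, false_or]
    split_ifs <;> simp_all
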